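-- pv_equiv track=rewrite | github.com/vrhsr/WavKAN-CL-Cross-Dataset-Generalization | src/label_mapping.py | map_snomed_to_superclass
-- ===== SOURCE A (Python) =====
-- SNOMED_MAPPING = {
--     # NORM - Normal
--     '426783006': 'NORM', # Normal sinus rhythm
--
--     # MI - Myocardial Infarction
--     '164861001': 'MI',   # Myocardial ischemia
--     '164865005': 'MI',   # Myocardial infarction
--     '164867002': 'MI',   # Old myocardial infarction
--     '54329005': 'MI',    # Acute myocardial infarction
--     '57054005': 'MI',    # Acute myocardial infarction
--     '433524009': 'MI',   # Anteroseptal myocardial infarction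
--     '270492004': 'MI',   # Ischemia (sometimes coded here)
--
--     # STTC - ST/T wave changes (Arrhythmias often grouped here or separately, but we follow general rhythm rules)
--     '426177001': 'STTC', # Sinus bradycardia
--     '427084000': 'STTC', # Sinus tachycardia
--     '164931005': 'STTC', # ST segment elevation
--     '429622005': 'STTC', # ST segment depression
--     '59931005': 'STTC',  # T wave inversion
--     '164890007': 'STTC', # Atrial flutter
--     '17338001': 'STTC',  # Ventricular ectopic beats
--     '427172004': 'STTC', # Premature ventricular contractions (PVC)
--     '284470004': 'STTC', # Premature atrial contraction (PAC)
--     '326202001': 'STTC', # Premature contractions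
--     '427393009': 'STTC', # Sinus arrhythmia
--     '63593006': 'STTC',  # PAC
--     '164884008': 'STTC', # VFB
--     '713427006': 'STTC', # Complete RBBB (wait, RBBB usually CD. Keeping as CD below)
--
--     # CD - Conduction Disturbance
--     '164889003': 'CD',   # Atrial fibrillation - grouped in CD in many PhysioNet simplifications
--     '164909002': 'CD',   # LBBB
--     '59118001': 'CD',    # RBBB
--     '713426002': 'CD',   # Incomplete RBBB
--     '251146004': 'CD',   # QT interval prolongation
--     '698252002': 'CD',   # NSIVCB
--     '195042002': 'CD',   # 2nd degree AV block
--     '233917008': 'CD',   # AV block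
--     '27885002': 'CD',    # 3rd degree AV block
--
--     # HYP - Hypertrophy
--     '164934002': 'HYP',  # Left ventricular hypertrophy
--     '39732003': 'HYP',   # Right ventricular hypertrophy
--     '445118002': 'HYP',  # Left atrial hypertrophy
-- }
--
-- STRING_MAPPING = {
--     'SB': 'STTC',
--     'SR': 'NORM',
--     'AFIB': 'CD',
--     'STTC': 'STTC',
--     'PVC': 'STTC',
--     'PAC': 'STTC',
--     'TVI': 'STTC',
--     'AVB': 'CD',
--     'LBBB': 'CD',
--     'RBBB': 'CD',
-- }
--
-- def map_snomed_to_superclass(snomed_codes_str, split_char=','):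
--     """
--     Given a string of SNOMED codes (e.g. '164889003,270492004'),
--     returns a multi-hot list [NORM, MI, STTC, CD, HYP] of size 5.
--     If no valid mapping, returns None (can be skipped).
--     """
--     codes = [c.strip() for c in str(snomed_codes_str).split(split_char) if c.strip()]
--     labels = [0, 0, 0, 0, 0] # NORM, MI, STTC, CD, HYP
--     mapping_order = ['NORM', 'MI', 'STTC', 'CD', 'HYP']
--
--     found_any = False
--     for code in codes:
--         if code in SNOMED_MAPPING:
--             sc = SNOMED_MAPPING[code]
--             idx = mapping_order.index(sc)
--             labels[idx] = 1
--             found_any = True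
--         elif code in STRING_MAPPING:
--             sc = STRING_MAPPING[code]
--             idx = mapping_order.index(sc)
--             labels[idx] = 1
--             found_any = True
--
--     if not found_any:
--         return None
--
--     return labels
-- ===== SOURCE B (Python) =====
-- # Class-major decomposition: instead of a code->class dict looked up per token,
-- # store the codes PARTITIONED BY superclass and build each label slot by asking
-- # whether any parsed token lies in that class's code set (correct because the
-- # multi-hot slot for a class is 1 iff some token maps to it, and the two
-- # original dicts have disjoint keys so the partition is exact).
-- CLASS_CODES = {
--     'NORM': {'426783006', 'SR'},
--     'MI': {'164861001', '164865005', '164867002', '54329005', '57054005',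
--            '433524009', '270492004'},
--     'STTC': {'426177001', '427084000', '164931005', '429622005', '59931005',
--              '164890007', '17338001', '427172004', '284470004', '326202001',
--              '427393009', '63593006', '164884008', '713427006',
--              'SB', 'STTC', 'PVC', 'PAC', 'TVI'},
--     'CD': {'164889003', '164909002', '59118001', '713426002', '251146004',
--            '698252002', '195042002', '233917008', '27885002',
--            'AFIB', 'AVB', 'LBBB', 'RBBB'},
--     'HYP': {'164934002', '39732003', '445118002'},
-- }
--
-- ORDER = ['NORM', 'MI', 'STTC', 'CD', 'HYP']
--
-- def map_snomed_to_superclass(snomed_codes_str, split_char=','):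
--     codes = [c.strip() for c in str(snomed_codes_str).split(split_char) if c.strip()]
--     labels = [1 if any(c in CLASS_CODES[name] for c in codes) else 0
--               for name in ORDER]
--     return labels if any(labels) else None
-- ===== Notes on version B (the rewrite author's own statement) =====
-- stated objective: alternative
-- what changed: Inverted data structure and loop nesting: instead of a single pass over the tokens looking each up in code->class dicts and setting labels[idx]=1 with a found_any flag, B partitions the codes by superclass (class->code-set table) and computes each of the 5 label slots independently as 'does any token lie in this class's set', returning None when all slots are 0.
import Mathlib
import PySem

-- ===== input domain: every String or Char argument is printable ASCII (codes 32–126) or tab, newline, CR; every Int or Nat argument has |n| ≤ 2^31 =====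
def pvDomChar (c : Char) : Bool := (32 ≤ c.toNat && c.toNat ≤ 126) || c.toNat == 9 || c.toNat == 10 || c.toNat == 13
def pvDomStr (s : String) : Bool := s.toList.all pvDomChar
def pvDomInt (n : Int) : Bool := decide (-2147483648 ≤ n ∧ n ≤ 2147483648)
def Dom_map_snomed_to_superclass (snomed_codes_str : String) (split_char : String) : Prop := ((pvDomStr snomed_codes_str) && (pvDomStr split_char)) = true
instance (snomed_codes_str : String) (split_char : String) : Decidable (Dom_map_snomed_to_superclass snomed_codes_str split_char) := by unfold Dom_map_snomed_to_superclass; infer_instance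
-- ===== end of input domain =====

-- B inverts A's data structure and loop: codes are partitioned by superclass and each
-- of the 5 label slots is computed independently as "does any token lie in this class's
-- set", instead of A's single token pass with dict lookups, labels[idx]=1 and a flag.

-- ===== PORT A =====
def snomedMapping : PySem.Dict String String := PySem.Dict.mk
  [("426783006","NORM"),
   ("164861001","MI"),("164865005","MI"),("164867002","MI"),("54329005","MI"),
   ("57054005","MI"),("433524009","MI"),("270492004","MI"),
   ("426177001","STTC"),("427084000","STTC"),("164931005","STTC"),("429622005","STTC"),
   ("59931005","STTC"),("164890007","STTC"),("17338001","STTC"),("427172004","STTC"),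
   ("284470004","STTC"),("326202001","STTC"),("427393009","STTC"),("63593006","STTC"),
   ("164884008","STTC"),("713427006","STTC"),
   ("164889003","CD"),("164909002","CD"),("59118001","CD"),("713426002","CD"),
   ("251146004","CD"),("698252002","CD"),("195042002","CD"),("233917008","CD"),
   ("27885002","CD"),
   ("164934002","HYP"),("39732003","HYP"),("445118002","HYP")]

def stringMapping : PySem.Dict String String := PySem.Dict.mk
  [("SB","STTC"),("SR","NORM"),("AFIB","CD"),("STTC","STTC"),("PVC","STTC"),
   ("PAC","STTC"),("TVI","STTC"),("AVB","CD"),("LBBB","CD"),("RBBB","CD")]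

def mappingOrder : List String := ["NORM", "MI", "STTC", "CD", "HYP"]

-- labels[mapping_order.index(sc)] = 1  (index always succeeds for A's table values;
-- the none branch is only a totality guard)
def setLabel (labels : List Int) (sc : String) : List Int :=
  match PySem.List.index? mappingOrder sc with
  | some idx => labels.set idx 1
  | none => labels

-- the body of A's 'for code in codes' loop, state = (labels, found_any)
def stepA (st : List Int × Bool) (code : String) : List Int × Bool :=
  if snomedMapping.contains code then
    (setLabel st.1 ((snomedMapping.get? code).getD ""), true)
  else if stringMapping.contains code then
    (setLabel st.1 ((stringMapping.get? code).getD ""), true)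
  else st

def map_snomed_to_superclass (snomed_codes_str : String) (split_char : String) : Option (List Int) :=
  match PySem.Str.split? snomed_codes_str split_char with
  | none => none   -- empty separator: Python raises ValueError; excluded by Pre_
  | some parts =>
    let codes := (parts.map PySem.Str.strip).filter (fun c => c ≠ "")
    let st := codes.foldl stepA ([0, 0, 0, 0, 0], false)
    if st.2 then some st.1 else none

-- ===== PORT B =====
-- CLASS_CODES: the codes partitioned by superclass (literal sets are literal lists)
def classCodes : PySem.Dict String (List String) := PySem.Dict.mk
  [("NORM", ["426783006","SR"]),
   ("MI", ["164861001","164865005","164867002","54329005","57054005",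
           "433524009","270492004"]),
   ("STTC", ["426177001","427084000","164931005","429622005","59931005",
             "164890007","17338001","427172004","284470004","326202001",
             "427393009","63593006","164884008","713427006",
             "SB","STTC","PVC","PAC","TVI"]),
   ("CD", ["164889003","164909002","59118001","713426002","251146004",
           "698252002","195042002","233917008","27885002",
           "AFIB","AVB","LBBB","RBBB"]),
   ("HYP", ["164934002","39732003","445118002"])]

def orderB : List String := ["NORM", "MI", "STTC", "CD", "HYP"]

def map_snomed_to_superclass_alt (snomed_codes_str : String) (split_char : String) : Option (List Int) :=
  match PySem.Str.split? snomed_codes_str split_char with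
  | none => none   -- empty separator: Python raises ValueError; excluded by Pre_
  | some parts =>
    let codes := (parts.map PySem.Str.strip).filter (fun c => c ≠ "")
    -- labels = [1 if any(c in CLASS_CODES[name] for c in codes) else 0 for name in ORDER]
    let labels := orderB.map (fun name =>
      if codes.any (fun c => ((classCodes.get? name).getD []).contains c) then (1 : Int) else 0)
    if labels.any (fun x => x ≠ 0) then some labels else none

-- ===== PRECONDITION & SPEC =====
-- Pre_ excludes only the empty separator, on which Python's str.split raises ValueError.
def Pre_map_snomed_to_superclass (snomed_codes_str : String) (split_char : String) : Prop :=
  split_char ≠ ""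
instance (snomed_codes_str : String) (split_char : String) : Decidable (Pre_map_snomed_to_superclass snomed_codes_str split_char) := by unfold Pre_map_snomed_to_superclass; infer_instance

def pvWitness_map_snomed_to_superclass : String × String := ("426783006, SB, x", ",")

def Spec_map_snomed_to_superclass (snomed_codes_str : String) (split_char : String) (out : Option (List Int)) : Prop := out = map_snomed_to_superclass_alt snomed_codes_str split_char
instance (snomed_codes_str : String) (split_char : String) (out : Option (List Int)) : Decidable (Spec_map_snomed_to_superclass snomed_codes_str split_char out) := by unfold Spec_map_snomed_to_superclass; infer_instance

-- ===== CLAIM (what is proved, stated in full; the proofs are below) =====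
def Claim_equal_map_snomed_to_superclass : Prop := ∀ (snomed_codes_str : String) (split_char : String), Dom_map_snomed_to_superclass snomed_codes_str split_char → Pre_map_snomed_to_superclass snomed_codes_str split_char → Spec_map_snomed_to_superclass snomed_codes_str split_char (map_snomed_to_superclass snomed_codes_str split_char)

-- ===== LEMMAS AND PROOFS =====

-- proof-side merged association list: A's two tables one after the other
def combinedMappingList : List (String × String) :=
  snomedMapping.items ++ stringMapping.items

def combinedMapping : PySem.Dict String String := PySem.Dict.mk combinedMappingList

-- the set of found superclass names determines A's labels vector
def mark (f : PySem.Set String) : List Int :=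
  orderB.map (fun name => if PySem.Set.contains f name then 1 else 0)

-- proof-side reformulation of A's loop body acting on the found-set
def stepF (f : PySem.Set String) (code : String) : PySem.Set String :=
  match combinedMapping.get? code with
  | some sc => PySem.Set.add f sc
  | none => f

theorem get?_mk_append (l₁ l₂ : List (String × String)) (c : String) :
    (PySem.Dict.mk (l₁ ++ l₂)).get? c =
      ((PySem.Dict.mk l₁).get? c).orElse (fun _ => (PySem.Dict.mk l₂).get? c) := by
  induction l₁ with
  | nil => simp [PySem.Dict.get?]
  | cons p rest ih =>
    obtain ⟨k, v⟩ := p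
    rw [List.cons_append, PySem.Dict.get?_mk_cons, PySem.Dict.get?_mk_cons]
    by_cases h : k == c
    · simp [h]
    · simp only [h, Bool.false_eq_true, if_false, ih]

theorem combined_get? (c : String) :
    combinedMapping.get? c =
      ((snomedMapping.get? c).orElse (fun _ => stringMapping.get? c)) :=
  get?_mk_append snomedMapping.items stringMapping.items c

theorem get?_mk_mem_snd (l : List (String × String)) (c v : String)
    (h : (PySem.Dict.mk l).get? c = some v) : v ∈ l.map Prod.snd := by
  induction l with
  | nil => simp [PySem.Dict.get?] at h
  | cons p rest ih =>
    obtain ⟨k, w⟩ := p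
    rw [PySem.Dict.get?_mk_cons] at h
    by_cases hk : k == c
    · simp [hk] at h; simp [h]
    · simp only [hk, Bool.false_eq_true, if_false] at h
      simp [ih h]

theorem combined_value_mem_order (c v : String)
    (h : combinedMapping.get? c = some v) : v ∈ orderB := by
  have hv : v ∈ combinedMappingList.map Prod.snd := get?_mk_mem_snd _ _ _ h
  have hall : ∀ x ∈ combinedMappingList.map Prod.snd, x ∈ orderB := by decide
  exact hall v hv

-- keys of the merged table are distinct
theorem nodup_keys_combined : (combinedMappingList.map Prod.fst).Nodup := by decide

theorem get?_eq_some_iff_mem (l : List (String × String))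
    (hnd : (l.map Prod.fst).Nodup) (c v : String) :
    (PySem.Dict.mk l).get? c = some v ↔ (c, v) ∈ l := by
  induction l with
  | nil => simp [PySem.Dict.get?]
  | cons p rest ih =>
    obtain ⟨k, w⟩ := p
    simp only [List.map_cons, List.nodup_cons] at hnd
    rw [PySem.Dict.get?_mk_cons]
    by_cases hk : k = c
    · subst hk
      simp only [beq_self_eq_true, if_true, List.mem_cons, Prod.mk.injEq, true_and]
      constructor
      · intro h; left; exact (Option.some.injEq _ _ ▸ h).symm ▸ rfl
      · rintro (rfl | hm)
        · rfl
        · exact absurd (List.mem_map_of_mem (f := Prod.fst) hm) hnd.1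
    · have : (k == c) = false := by simp [hk]
      rw [this]
      simp only [Bool.false_eq_true, if_false, List.mem_cons, Prod.mk.injEq]
      rw [ih hnd.2]
      constructor
      · intro h; right; exact h
      · rintro (⟨rfl, _⟩ | h)
        · exact absurd rfl hk
        · exact h

theorem combined_get?_eq_some_iff (c v : String) :
    combinedMapping.get? c = some v ↔ (c, v) ∈ combinedMappingList :=
  get?_eq_some_iff_mem combinedMappingList nodup_keys_combined c v

-- membership in a class's code list ⟺ the merged lookup returns that class
theorem class_contains_iff (name : String) (hname : name ∈ orderB) (c : String) :
    (((classCodes.get? name).getD []).contains c = true) ↔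
      combinedMapping.get? c = some name := by
  fin_cases hname <;>
    · rw [combined_get?_eq_some_iff]
      simp only [classCodes, combinedMappingList, snomedMapping, stringMapping]
      simp [PySem.Dict.get?, Prod.mk.injEq]

theorem contains_stepF_foldl (l : List String) (f : PySem.Set String) (name : String) :
    PySem.Set.contains (l.foldl stepF f) name =
      (PySem.Set.contains f name || l.any (fun c => combinedMapping.get? c == some name)) := by
  induction l generalizing f with
  | nil => simp
  | cons c cs ih =>
    rw [List.foldl_cons, ih, List.any_cons]
    unfold stepF
    cases hg : combinedMapping.get? c with
    | none => simp
    | some sc =>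
      simp only [hg, Option.some.injEq]
      by_cases hsc : sc = name
      · subst hsc
        simp [PySem.Set.contains_eq_listContains, PySem.Set.mem_add]
      · have h1 : PySem.Set.contains (PySem.Set.add f sc) name = PySem.Set.contains f name := by
          rw [Bool.eq_iff_iff]
          simp only [PySem.Set.contains_eq_listContains, List.contains_iff_mem]
          rw [PySem.Set.mem_add]
          simp [Ne.symm hsc]
        have h2 : ((some sc == some name) : Bool) = false := by simp [hsc]
        rw [h1, h2, Bool.false_or]

theorem mem_foldl_stepF (l : List String) (f : PySem.Set String)
    (hf : ∀ x ∈ f, x ∈ orderB) : ∀ x ∈ l.foldl stepF f, x ∈ orderB := by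
  induction l generalizing f with
  | nil => exact hf
  | cons c cs ih =>
    rw [List.foldl_cons]
    apply ih
    intro x hx
    unfold stepF at hx
    cases hg : combinedMapping.get? c with
    | none => rw [hg] at hx; exact hf x hx
    | some sc =>
      rw [hg] at hx
      rcases (PySem.Set.mem_add f sc x).mp hx with h | rfl
      · exact hf x h
      · exact combined_value_mem_order c x hg


theorem add_not_isEmpty (s : PySem.Set String) (x : String) :
    (PySem.Set.add s x).isEmpty = false := by
  rw [PySem.Set.add_eq_ite]
  split_ifs with h
  · cases s with
    | nil => simp at h
    | cons a t => simp [List.isEmpty]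
  · simp [List.isEmpty_eq_false_iff]

theorem setLabel_mark (f : PySem.Set String) (v : String) (hv : v ∈ orderB) :
    setLabel (mark f) v = mark (PySem.Set.add f v) := by
  simp only [orderB, List.mem_cons, List.not_mem_nil, or_false] at hv
  rcases hv with rfl | rfl | rfl | rfl | rfl <;>
    simp [setLabel, mark, orderB, mappingOrder, PySem.List.index?, List.idxOf?, List.findIdx?, List.findIdx?.go, List.set]

theorem stepA_mark (f : PySem.Set String) (c : String) :
    stepA (mark f, !f.isEmpty) c = (mark (stepF f c), !(stepF f c).isEmpty) := by
  unfold stepA stepF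
  by_cases hs : snomedMapping.contains c = true
  · have hsome : (snomedMapping.get? c).isSome := by
      rw [← PySem.Dict.contains_eq_isSome_get?]; exact hs
    obtain ⟨v, hv⟩ := Option.isSome_iff_exists.mp hsome
    have hcomb : combinedMapping.get? c = some v := by
      rw [combined_get?, hv]; rfl
    have hmem : v ∈ orderB := combined_value_mem_order c v hcomb
    simp [hs, hv, hcomb, setLabel_mark f v hmem, add_not_isEmpty]
  · by_cases ht : stringMapping.contains c = true
    · have hsome : (stringMapping.get? c).isSome := by
        rw [← PySem.Dict.contains_eq_isSome_get?]; exact ht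
      obtain ⟨v, hv⟩ := Option.isSome_iff_exists.mp hsome
      have hsnone : snomedMapping.get? c = none := by
        cases hg : snomedMapping.get? c with
        | none => rfl
        | some w =>
          exfalso; apply hs
          rw [PySem.Dict.contains_eq_isSome_get?, hg]; rfl
      have hcomb : combinedMapping.get? c = some v := by
        rw [combined_get?, hsnone, hv]; rfl
      have hmem : v ∈ orderB := combined_value_mem_order c v hcomb
      simp [hs, ht, hv, hcomb, setLabel_mark f v hmem, add_not_isEmpty]
    · have hsnone : snomedMapping.get? c = none := by
        cases hg : snomedMapping.get? c with
        | none => rfl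
        | some w =>
          exfalso; apply hs; rw [PySem.Dict.contains_eq_isSome_get?, hg]; rfl
      have htnone : stringMapping.get? c = none := by
        cases hg : stringMapping.get? c with
        | none => rfl
        | some w =>
          exfalso; apply ht; rw [PySem.Dict.contains_eq_isSome_get?, hg]; rfl
      have hcomb : combinedMapping.get? c = none := by
        rw [combined_get?, hsnone, htnone]; rfl
      simp [hs, ht, hcomb]

theorem any_mark (f : PySem.Set String) (hmem : ∀ x ∈ f, x ∈ orderB) :
    (mark f).any (fun x => x ≠ 0) = !f.isEmpty := by
  unfold mark
  rw [List.any_map]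
  have hcomp : ∀ name, ((fun (x : Int) => decide (x ≠ 0)) ∘
      (fun name => if PySem.Set.contains f name then (1 : Int) else 0)) name
      = PySem.Set.contains f name := by
    intro name
    by_cases hc : PySem.Set.contains f name = true <;> simp
  cases f with
  | nil => simp [PySem.Set.contains_eq_listContains]
  | cons a t =>
    have ha : a ∈ orderB := hmem a (by simp)
    have hca : PySem.Set.contains (a :: t) a = true := by
      simp [PySem.Set.contains_eq_listContains]
    simp only [List.isEmpty_cons, Bool.not_false]
    rw [List.any_eq_true]
    exact ⟨a, ha, by rw [hcomp a, hca]⟩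

theorem loop_inv (codes : List String) (f : PySem.Set String) :
    codes.foldl stepA (mark f, !f.isEmpty) =
      (mark (codes.foldl stepF f), !(codes.foldl stepF f).isEmpty) := by
  induction codes generalizing f with
  | nil => rfl
  | cons c cs ih =>
    rw [List.foldl_cons, List.foldl_cons, stepA_mark, ih]

-- ===== VERDICT (by name: the statement is the Claim_ definition above) =====
theorem map_snomed_to_superclass_spec : Claim_equal_map_snomed_to_superclass := by
  intro s sep _ _
  unfold Spec_map_snomed_to_superclass map_snomed_to_superclass map_snomed_to_superclass_alt
  cases hsp : PySem.Str.split? s sep with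
  | none => rfl
  | some parts =>
    simp only
    set codes := (parts.map PySem.Str.strip).filter (fun c => c ≠ "") with hcodes
    have h := loop_inv codes PySem.Set.empty
    have h0 : mark PySem.Set.empty = ([0, 0, 0, 0, 0] : List Int) := by decide
    have h1 : (!(PySem.Set.empty : PySem.Set String).isEmpty) = false := by decide
    rw [h0, h1] at h
    rw [h]
    set f := codes.foldl stepF PySem.Set.empty with hf
    -- B's per-slot test agrees with membership in the found-set f
    have hslot : ∀ name ∈ orderB,
        codes.any (fun c => ((classCodes.get? name).getD []).contains c) =
          PySem.Set.contains f name := by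
      intro name hname
      rw [hf, contains_stepF_foldl]
      have hce : PySem.Set.contains (PySem.Set.empty : PySem.Set String) name = false := rfl
      rw [hce, Bool.false_or]
      apply PySem.List.any_congr_mem
      intro c _
      rw [Bool.eq_iff_iff, beq_iff_eq]
      exact class_contains_iff name hname c
    -- hence B's labels list is exactly mark f
    have hlab : orderB.map (fun name =>
        if codes.any (fun c => ((classCodes.get? name).getD []).contains c) then (1 : Int) else 0)
        = mark f := by
      unfold mark
      apply List.map_congr_left
      intro name hname
      rw [hslot name hname]
    rw [hlab]
    -- and B's any(labels) test is exactly A's found_any flag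
    have hmem : ∀ x ∈ f, x ∈ orderB := mem_foldl_stepF codes PySem.Set.empty (by simp [PySem.Set.empty])
    rw [any_mark f hmem]
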